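-- pv_equiv track=rewrite | github.com/nnenoix/Groft | core/memory_rotation.py | _split_header_and_blocks
-- ===== SOURCE A (Python) =====
-- def _split_header_and_blocks(text: str) -> tuple[str, list[str]]:
--     """Session-log layout is: header, then one block per subagent completion
--     separated by '\n---\n\n'. Header ends at the first '---' on its own line
--     followed by blank — i.e. at the first block separator.
--
--     Returns (header_text_with_trailing_sep, [block_text, ...]).
--     Blocks do NOT include the trailing separator.
--     """
--     marker = "\n---\n\n"
--     first = text.find(marker)
--     if first == -1:
--         return text, []
--     header = text[: first + len(marker)]
--     rest = text[first + len(marker) :]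
--     if not rest.strip():
--         return header, []
--     blocks = [b.strip() for b in rest.split(marker) if b.strip()]
--     return header, blocks
-- ===== SOURCE B (Python) =====
-- def _split_header_and_blocks(text: str) -> tuple[str, list[str]]:
--     marker = "\n---\n\n"
--     m = len(marker)
--     segs, cur, i, n = [], [], 0, len(text)
--     while i < n:
--         if text.startswith(marker, i):
--             segs.append(''.join(cur))
--             cur = []
--             i += m
--         else:
--             cur.append(text[i])
--             i += 1
--     segs.append(''.join(cur))
--     if len(segs) == 1:
--         return text, []
--     header = segs[0] + marker
--     blocks = [s for s in (seg.strip() for seg in segs[1:]) if s]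
--     return header, blocks
-- ===== Notes on version B (the rewrite author's own statement) =====
-- stated objective: alternative
-- what changed: One explicit left-to-right character scan with a current-segment accumulator (startswith at each position, emit on marker match) replaces A's find + slices + empty-rest guard + str.split pipeline; header and blocks are read off the collected segments.
import Mathlib
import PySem

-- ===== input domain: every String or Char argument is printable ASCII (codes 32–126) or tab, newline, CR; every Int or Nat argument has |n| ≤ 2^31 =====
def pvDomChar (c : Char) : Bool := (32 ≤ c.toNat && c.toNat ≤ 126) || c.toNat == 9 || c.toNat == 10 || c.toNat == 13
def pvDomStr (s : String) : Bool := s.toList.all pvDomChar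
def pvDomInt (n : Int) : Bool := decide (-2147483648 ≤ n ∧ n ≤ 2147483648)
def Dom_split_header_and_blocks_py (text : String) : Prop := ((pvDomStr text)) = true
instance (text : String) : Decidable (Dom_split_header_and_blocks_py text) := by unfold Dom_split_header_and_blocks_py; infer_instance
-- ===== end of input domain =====

-- B replaces A's find/slice/split library pipeline by one explicit left-to-right character
-- scan with an accumulator that emits a segment at every marker match (objective: alternative).

-- ===== PORT A =====
def split_header_and_blocks_py (text : String) : String × List String :=
  let marker := "\n---\n\n"
  let first := PySem.Str.find text marker
  if first = -1 then (text, [])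
  else
    let header := PySem.Str.slice text none (some (first + PySem.Str.len marker))
    let rest := PySem.Str.slice text (some (first + PySem.Str.len marker)) none
    if PySem.Str.strip rest = "" then (header, [])
    else
      -- rest.split(marker): marker ≠ "", so split? is some; getD [] is unreachable
      let blocks := (((PySem.Str.split? rest marker).getD []).filter
          (fun b => !(PySem.Str.strip b == ""))).map PySem.Str.strip
      (header, blocks)

-- ===== PORT B =====
-- the while loop of Source B: scan the remaining characters, `cur` holds the current segment
-- reversed (Python appends to a list and joins), `acc` the emitted segments reversed;
-- text.startswith(marker, i) is List.isPrefixOf on the remaining characters.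
def altScan (s : List Char) (cur : List Char) (acc : List String) : List String :=
  match s with
  | [] => (String.ofList cur.reverse :: acc).reverse
  | c :: t =>
    if ("\n---\n\n" : String).toList.isPrefixOf (c :: t) then
      altScan ((c :: t).drop 6) [] (String.ofList cur.reverse :: acc)
    else
      altScan t (c :: cur) acc
termination_by s.length
decreasing_by
  · simp only [List.length_drop, List.length_cons]; omega
  · simp only [List.length_cons]; omega

def split_header_and_blocks_py_alt (text : String) : String × List String :=
  let segs := altScan text.toList [] []
  if segs.length = 1 then (text, [])
  else
    let header := segs.headD "" ++ "\n---\n\n"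
    let blocks := (segs.tail.map PySem.Str.strip).filter (fun p => !(p == ""))
    (header, blocks)

-- ===== PRECONDITION & SPEC =====
def Spec_split_header_and_blocks_py (text : String) (out : String × List String) : Prop := out = split_header_and_blocks_py_alt text
instance (text : String) (out : String × List String) : Decidable (Spec_split_header_and_blocks_py text out) := by unfold Spec_split_header_and_blocks_py; infer_instance

-- ===== CLAIM (what is proved, stated in full; the proofs are below) =====
def Claim_equal_split_header_and_blocks_py : Prop := ∀ (text : String), Dom_split_header_and_blocks_py text → Spec_split_header_and_blocks_py text (split_header_and_blocks_py text)

-- ===== LEMMAS AND PROOFS =====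

-- reference version of Python's str.split with a non-empty separator: first occurrence, then recurse
def splitRef (sep : List Char) (s : List Char) : List (List Char) :=
  if h : PySem.Chars.find s sep = -1 ∨ sep = [] then [s]
  else
    s.take (PySem.Chars.find s sep).toNat ::
      splitRef sep (s.drop ((PySem.Chars.find s sep).toNat + sep.length))
termination_by s.length
decreasing_by
  rw [not_or] at h
  have hinf : sep <:+: s := (PySem.Chars.find_ne_neg_one_iff s sep).mp h.1
  have hlen : sep.length ≤ s.length := hinf.length_le
  have hsep : 0 < sep.length := List.length_pos_of_ne_nil h.2
  simp only [List.length_drop]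
  omega

lemma splitRef_neg (sep s : List Char) (h : PySem.Chars.find s sep = -1) :
    splitRef sep s = [s] := by
  rw [splitRef]; simp [h]

lemma splitRef_pos (sep s : List Char) (hsep : sep ≠ []) (h : PySem.Chars.find s sep ≠ -1) :
    splitRef sep s = s.take (PySem.Chars.find s sep).toNat ::
      splitRef sep (s.drop ((PySem.Chars.find s sep).toNat + sep.length)) := by
  rw [splitRef]; simp [h, hsep]

lemma splitRef_ne_nil (sep s : List Char) : splitRef sep s ≠ [] := by
  unfold splitRef; split <;> simp

-- find.go at offset k is find at offset 0, shifted
lemma find_go_offset (sub : List Char) (hsub : sub ≠ []) :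
    ∀ (l : List Char) (k : Nat), PySem.Chars.find.go sub l k =
      if PySem.Chars.find.go sub l 0 = -1 then -1 else PySem.Chars.find.go sub l 0 + k := by
  intro l
  induction l with
  | nil =>
    intro k
    simp [PySem.Chars.find.go, List.isEmpty_iff, hsub]
  | cons c t ih =>
    intro k
    rw [PySem.Chars.find.go.eq_2 sub k c t, PySem.Chars.find.go.eq_2 sub 0 c t]
    by_cases hp : sub.isPrefixOf (c :: t) = true
    · simp [hp]
    · rw [ih (k + 1), ih 1]
      have hnn : PySem.Chars.find.go sub t 0 = -1 ∨ 0 ≤ PySem.Chars.find.go sub t 0 := by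
        by_cases hm : PySem.Chars.find.go sub t 0 = -1
        · exact Or.inl hm
        · exact Or.inr ((PySem.Chars.find_nonneg_iff t sub).mpr
            ((PySem.Chars.find_ne_neg_one_iff t sub).mp hm))
      rcases hnn with hm | hm
      · simp [hp, hm]
      · by_cases hm1 : PySem.Chars.find.go sub t 0 = -1
        · simp [hp, hm1]
        · have h1 : PySem.Chars.find.go sub t 0 + (1 : Int) ≠ -1 := by omega
          simp only [hp, Bool.false_eq_true, if_false, hm1]
          omega

lemma find_cons (sub : List Char) (hsub : sub ≠ []) (c : Char) (t : List Char) :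
    PySem.Chars.find (c :: t) sub =
      if sub.isPrefixOf (c :: t) = true then 0
      else if PySem.Chars.find t sub = -1 then -1 else PySem.Chars.find t sub + 1 := by
  unfold PySem.Chars.find
  rw [PySem.Chars.find.go.eq_2]
  by_cases hp : sub.isPrefixOf (c :: t) = true
  · simp [hp]
  · simp only [hp, Bool.false_eq_true, if_false]
    rw [find_go_offset sub hsub t 1]
    norm_num

-- prepend a prefix to the head of a non-empty list
def consHead (pre : List Char) : List (List Char) → List (List Char)
  | [] => [pre]
  | h :: t => (pre ++ h) :: t

lemma consHead_nil (l : List (List Char)) (hne : l ≠ []) : consHead [] l = l := by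
  cases l with
  | nil => exact absurd rfl hne
  | cons a b => simp [consHead]

-- B's scan computes exactly the reference split, with the pending state folded in
lemma altScan_spec (s cur : List Char) (acc : List String) :
    altScan s cur acc =
      acc.reverse ++ (consHead cur.reverse (splitRef ("\n---\n\n" : String).toList s)).map String.ofList := by
  induction s, cur, acc using altScan.induct with
  | case1 cur acc =>
    have hsep : ("\n---\n\n" : String).toList ≠ [] := by decide
    have hfind : PySem.Chars.find ([] : List Char) ("\n---\n\n" : String).toList = -1 := by
      simp [PySem.Chars.find, PySem.Chars.find.go, List.isEmpty_iff, hsep]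
    rw [altScan, splitRef_neg _ _ hfind]
    simp [consHead]
  | case2 cur acc c t hp ih =>
    have hsep : ("\n---\n\n" : String).toList ≠ [] := by decide
    simp only [List.unattach_attach, List.unattach_reverse] at ih
    rw [altScan, if_pos hp, ih]
    have hfind : PySem.Chars.find (c :: t) ("\n---\n\n" : String).toList = 0 := by
      unfold PySem.Chars.find
      rw [PySem.Chars.find.go.eq_2]
      simp only [hp, if_true]
      norm_num
    rw [splitRef_pos _ (c :: t) hsep (by rw [hfind]; omega)]
    simp only [List.reverse_nil]
    rw [consHead_nil _ (splitRef_ne_nil _ _)]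
    have hlen6 : ("\n---\n\n" : String).toList.length = 6 := by decide
    have hfind' : PySem.Chars.find (c :: t) ['\n', '-', '-', '-', '\n', '\n'] = 0 := hfind
    simp [hfind, hfind', hlen6, consHead]
  | case3 cur acc c t hp ih =>
    have hsep : ("\n---\n\n" : String).toList ≠ [] := by decide
    rw [altScan, if_neg hp, ih]
    have hfc := find_cons ("\n---\n\n" : String).toList hsep c t
    rw [if_neg hp] at hfc
    by_cases hm : PySem.Chars.find t ("\n---\n\n" : String).toList = -1
    · have hfind : PySem.Chars.find (c :: t) ("\n---\n\n" : String).toList = -1 := by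
        rw [hfc, if_pos hm]
      rw [splitRef_neg _ t hm, splitRef_neg _ (c :: t) hfind]
      simp [consHead]
    · have hnn : 0 ≤ PySem.Chars.find t ("\n---\n\n" : String).toList :=
        (PySem.Chars.find_nonneg_iff t _).mpr
          ((PySem.Chars.find_ne_neg_one_iff t _).mp hm)
      have hfind : PySem.Chars.find (c :: t) ("\n---\n\n" : String).toList =
          PySem.Chars.find t ("\n---\n\n" : String).toList + 1 := by
        rw [hfc, if_neg hm]
      have hne1 : PySem.Chars.find (c :: t) ("\n---\n\n" : String).toList ≠ -1 := by
        rw [hfind]; omega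
      rw [splitRef_pos _ t hsep hm, splitRef_pos _ (c :: t) hsep hne1]
      have htonat : (PySem.Chars.find (c :: t) ("\n---\n\n" : String).toList).toNat =
          (PySem.Chars.find t ("\n---\n\n" : String).toList).toNat + 1 := by
        rw [hfind]; omega
      rw [htonat]
      have harith : (PySem.Chars.find t ("\n---\n\n" : String).toList).toNat + 1 +
          ("\n---\n\n" : String).toList.length =
          ((PySem.Chars.find t ("\n---\n\n" : String).toList).toNat +
            ("\n---\n\n" : String).toList.length) + 1 := by omega
      rw [harith]
      simp [consHead, List.take_succ_cons, List.drop_succ_cons]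

lemma altScan_top (s : List Char) :
    altScan s [] [] = (splitRef ("\n---\n\n" : String).toList s).map String.ofList := by
  rw [altScan_spec s [] []]
  simp only [List.reverse_nil, List.nil_append]
  rw [consHead_nil _ (splitRef_ne_nil _ _)]

lemma strip_eq_nil_all_space (s : List Char) (h : PySem.Chars.strip s = []) :
    ∀ c ∈ s, PySem.Chars.isspace c = true := by
  intro c hc
  unfold PySem.Chars.strip PySem.Chars.rstrip PySem.Chars.lstrip at h
  have h2 : List.dropWhile PySem.Chars.isspace (List.dropWhile PySem.Chars.isspace s).reverse = [] := by
    rcases hd : List.dropWhile PySem.Chars.isspace (List.dropWhile PySem.Chars.isspace s).reverse with _ | _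
    · rfl
    · rw [hd] at h; simp at h
  have hall : ∀ x ∈ (List.dropWhile PySem.Chars.isspace s).reverse, PySem.Chars.isspace x = true :=
    List.dropWhile_eq_nil_iff.mp h2
  have hs : s = List.takeWhile PySem.Chars.isspace s ++ List.dropWhile PySem.Chars.isspace s :=
    (List.takeWhile_append_dropWhile).symm
  rw [hs] at hc
  rcases List.mem_append.mp hc with h1 | h1
  · exact List.mem_takeWhile_imp h1
  · exact hall c (List.mem_reverse.mpr h1)

-- all-whitespace rest contains no marker, so it splits as [rest]
lemma splitRef_of_all_space (sep s : List Char) (hc : Char.ofNat 45 ∈ sep)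
    (h : ∀ c ∈ s, PySem.Chars.isspace c = true) : splitRef sep s = [s] := by
  rw [splitRef]
  have hfind : PySem.Chars.find s sep = -1 := by
    rw [PySem.Chars.find_eq_neg_one_iff]
    intro hinf
    have : Char.ofNat 45 ∈ s := hinf.mem hc
    have := h _ this
    simp [PySem.Chars.isspace] at this
  simp [hfind]

lemma take_find_add (s sep : List Char) (hnn : 0 ≤ PySem.Chars.find s sep) :
    s.take ((PySem.Chars.find s sep).toNat + sep.length) =
      s.take (PySem.Chars.find s sep).toNat ++ sep := by
  have hpre : sep <+: s.drop (PySem.Chars.find s sep).toNat :=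
    (PySem.Chars.find_spec hnn).1
  rcases hpre with ⟨t, ht⟩
  rw [List.take_add, ← ht, List.take_left]

lemma splitOn_go_spec (sep : List Char) (hsep : sep ≠ []) :
    ∀ (fuel : Nat) (l cur : List Char) (acc : List (List Char)), l.length < fuel →
      PySem.Chars.splitOn.go sep fuel l cur acc =
        acc.reverse ++ consHead cur.reverse (splitRef sep l) := by
  intro fuel
  induction fuel with
  | zero => intro l cur acc h; omega
  | succ f ih =>
    intro l cur acc h
    match l with
    | [] =>
      have hfind : PySem.Chars.find ([] : List Char) sep = -1 := by
        simp [PySem.Chars.find, PySem.Chars.find.go, List.isEmpty_iff, hsep]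
      rw [PySem.Chars.splitOn.go.eq_def, splitRef_neg sep [] hfind]
      simp [consHead]
    | c :: t =>
      rw [PySem.Chars.splitOn.go.eq_def]
      by_cases hp : sep.isPrefixOf (c :: t) = true
      · simp only [hp, if_true]
        have hsl : 0 < sep.length := List.length_pos_of_ne_nil hsep
        have hdroplen : (List.drop sep.length (c :: t)).length < f := by
          simp only [List.length_drop, List.length_cons]
          simp only [List.length_cons] at h
          omega
        rw [ih _ _ _ hdroplen]
        have hfind : PySem.Chars.find (c :: t) sep = 0 := by
          unfold PySem.Chars.find
          rw [PySem.Chars.find.go.eq_2]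
          simp [hp]
        rw [splitRef_pos sep (c :: t) hsep (by rw [hfind]; omega)]
        simp only [List.reverse_nil]
        rw [consHead_nil _ (splitRef_ne_nil sep _)]
        simp [hfind, consHead]
      · simp only [hp, Bool.false_eq_true, if_false]
        have htlen : t.length < f := by simp only [List.length_cons] at h; omega
        rw [ih _ _ _ htlen]
        have hfc := find_cons sep hsep c t
        rw [if_neg (by simp [hp])] at hfc
        by_cases hm : PySem.Chars.find t sep = -1
        · have hfind : PySem.Chars.find (c :: t) sep = -1 := by rw [hfc]; simp [hm]
          rw [splitRef_neg sep t hm, splitRef_neg sep (c :: t) hfind]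
          simp [consHead]
        · have hnn : 0 ≤ PySem.Chars.find t sep :=
            (PySem.Chars.find_nonneg_iff t sep).mpr
              ((PySem.Chars.find_ne_neg_one_iff t sep).mp hm)
          have hfind : PySem.Chars.find (c :: t) sep = PySem.Chars.find t sep + 1 := by
            rw [hfc]; simp [hm]
          have hne1 : PySem.Chars.find (c :: t) sep ≠ -1 := by rw [hfind]; omega
          rw [splitRef_pos sep t hsep hm, splitRef_pos sep (c :: t) hsep hne1]
          have htonat : (PySem.Chars.find (c :: t) sep).toNat = (PySem.Chars.find t sep).toNat + 1 := by
            rw [hfind]; omega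
          rw [htonat]
          have harith : (PySem.Chars.find t sep).toNat + 1 + sep.length =
              ((PySem.Chars.find t sep).toNat + sep.length) + 1 := by omega
          rw [harith]
          simp [consHead, List.take_succ_cons, List.drop_succ_cons]

lemma splitOn_eq_splitRef (s sep : List Char) (hsep : sep ≠ []) :
    PySem.Chars.splitOn s sep = splitRef sep s := by
  unfold PySem.Chars.splitOn
  rw [splitOn_go_spec sep hsep (s.length + 1) s [] [] (by omega)]
  rcases hr : splitRef sep s with _ | ⟨h, t⟩
  · exact absurd hr (splitRef_ne_nil sep s)
  · simp [consHead]

-- filter-then-map-strip (A) equals map-strip-then-filter (B)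
lemma filter_map_strip (l : List String) :
    (l.filter (fun b => !(PySem.Str.strip b == ""))).map PySem.Str.strip =
      (l.map PySem.Str.strip).filter (fun p => !(p == "")) := by
  rw [List.filter_map]
  rfl

-- ===== VERDICT (by name: the statement is the Claim_ definition above) =====
theorem split_header_and_blocks_py_spec : Claim_equal_split_header_and_blocks_py := by
  intro text _
  unfold Spec_split_header_and_blocks_py
  have hsep : ("\n---\n\n" : String).toList ≠ [] := by decide
  have hlen6 : ("\n---\n\n" : String).toList.length = 6 := by decide
  have hsplit : ∀ s : String, PySem.Str.split? s "\n---\n\n" =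
      some ((splitRef ("\n---\n\n" : String).toList s.toList).map String.ofList) := by
    intro s
    unfold PySem.Str.split? PySem.Chars.split?
    rw [splitOn_eq_splitRef _ _ hsep]
    simp
  by_cases hf : PySem.Str.find text "\n---\n\n" = -1
  · have hfC : PySem.Chars.find text.toList ("\n---\n\n" : String).toList = -1 := hf
    have href := splitRef_neg ("\n---\n\n" : String).toList text.toList hfC
    have hA : split_header_and_blocks_py text = (text, []) := by
      show (if PySem.Str.find text "\n---\n\n" = -1 then (text, ([] : List String))
        else if PySem.Str.strip (PySem.Str.slice text (some (PySem.Str.find text "\n---\n\n" + PySem.Str.len "\n---\n\n")) none) = "" then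
          (PySem.Str.slice text none (some (PySem.Str.find text "\n---\n\n" + PySem.Str.len "\n---\n\n")), [])
        else
          (PySem.Str.slice text none (some (PySem.Str.find text "\n---\n\n" + PySem.Str.len "\n---\n\n")),
            ((((PySem.Str.split? (PySem.Str.slice text (some (PySem.Str.find text "\n---\n\n" + PySem.Str.len "\n---\n\n")) none) "\n---\n\n").getD []).filter
              (fun b => !(PySem.Str.strip b == ""))).map PySem.Str.strip))) = (text, [])
      rw [if_pos hf]
    have hB : split_header_and_blocks_py_alt text = (text, []) := by
      show (if (altScan text.toList [] []).length = 1 then (text, ([] : List String))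
        else ((altScan text.toList [] []).headD "" ++ "\n---\n\n",
          ((altScan text.toList [] []).tail.map PySem.Str.strip).filter (fun p => !(p == "")))) = (text, [])
      rw [altScan_top, href]
      simp
    rw [hA, hB]
  · have hfC : PySem.Chars.find text.toList ("\n---\n\n" : String).toList ≠ -1 := hf
    have hnn : 0 ≤ PySem.Chars.find text.toList ("\n---\n\n" : String).toList :=
      (PySem.Chars.find_nonneg_iff _ _).mpr ((PySem.Chars.find_ne_neg_one_iff _ _).mp hfC)
    set n : Nat := (PySem.Chars.find text.toList ("\n---\n\n" : String).toList).toNat with hn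
    have hfind : PySem.Chars.find text.toList ("\n---\n\n" : String).toList = (n : Int) := by
      rw [hn, Int.toNat_of_nonneg hnn]
    have hflen : PySem.Str.find text "\n---\n\n" + PySem.Str.len "\n---\n\n" = (((n + 6 : Nat)) : Int) := by
      show PySem.Chars.find text.toList ("\n---\n\n" : String).toList + PySem.Str.len "\n---\n\n" = _
      rw [hfind]
      show (n : Int) + 6 = _
      push_cast
      ring
    have hrefpos := splitRef_pos ("\n---\n\n" : String).toList text.toList hsep hfC
    rw [← hn, hlen6] at hrefpos
    have htake := take_find_add text.toList ("\n---\n\n" : String).toList hnn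
    rw [← hn, hlen6] at htake
    have hheader : PySem.Str.slice text none (some (PySem.Str.find text "\n---\n\n" + PySem.Str.len "\n---\n\n")) =
        String.ofList (List.take (n + 6) text.toList) := by
      unfold PySem.Str.slice
      rw [hflen, PySem.Chars.slice_eq_listSlice]
      rw [PySem.List.slice_to _ (by positivity)]
      rw [Int.toNat_natCast]
    have hrest : PySem.Str.slice text (some (PySem.Str.find text "\n---\n\n" + PySem.Str.len "\n---\n\n")) none =
        String.ofList (List.drop (n + 6) text.toList) := by
      unfold PySem.Str.slice
      rw [hflen, PySem.Chars.slice_eq_listSlice]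
      rw [PySem.List.slice_from _ (by positivity)]
      rw [Int.toNat_natCast]
    have hsplitrest : PySem.Str.split? (String.ofList (List.drop (n + 6) text.toList)) "\n---\n\n" =
        some ((splitRef ("\n---\n\n" : String).toList (List.drop (n + 6) text.toList)).map String.ofList) := by
      rw [hsplit]
      simp
    have hheadereq : String.ofList (List.take (n + 6) text.toList) =
        String.ofList (List.take n text.toList) ++ "\n---\n\n" := by
      rw [htake, ← String.ofList_append]
      have hml : ("\n---\n\n" : String).toList = ['\n', '-', '-', '-', '\n', '\n'] := by decide
      rw [hml]
    have hAs : split_header_and_blocks_py text =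
        (if PySem.Str.strip (String.ofList (List.drop (n + 6) text.toList)) = ""
         then (String.ofList (List.take (n + 6) text.toList), [])
         else (String.ofList (List.take (n + 6) text.toList),
           ((((splitRef ("\n---\n\n" : String).toList (List.drop (n + 6) text.toList)).map String.ofList).filter
             (fun b => !(PySem.Str.strip b == ""))).map PySem.Str.strip))) := by
      show (if PySem.Str.find text "\n---\n\n" = -1 then (text, ([] : List String))
        else if PySem.Str.strip (PySem.Str.slice text (some (PySem.Str.find text "\n---\n\n" + PySem.Str.len "\n---\n\n")) none) = "" then
          (PySem.Str.slice text none (some (PySem.Str.find text "\n---\n\n" + PySem.Str.len "\n---\n\n")), [])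
        else
          (PySem.Str.slice text none (some (PySem.Str.find text "\n---\n\n" + PySem.Str.len "\n---\n\n")),
            ((((PySem.Str.split? (PySem.Str.slice text (some (PySem.Str.find text "\n---\n\n" + PySem.Str.len "\n---\n\n")) none) "\n---\n\n").getD []).filter
              (fun b => !(PySem.Str.strip b == ""))).map PySem.Str.strip))) = _
      rw [if_neg hf, hrest, hheader, hsplitrest]
      simp only [Option.getD_some]
    have hBs : split_header_and_blocks_py_alt text =
        (String.ofList (List.take n text.toList) ++ "\n---\n\n",
          (((splitRef ("\n---\n\n" : String).toList (List.drop (n + 6) text.toList)).map String.ofList).map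
            PySem.Str.strip).filter (fun p => !(p == ""))) := by
      show (if (altScan text.toList [] []).length = 1 then (text, ([] : List String))
        else ((altScan text.toList [] []).headD "" ++ "\n---\n\n",
          ((altScan text.toList [] []).tail.map PySem.Str.strip).filter (fun p => !(p == "")))) = _
      rw [altScan_top, hrefpos]
      simp only [List.map_cons, List.length_cons, List.headD_cons, List.tail_cons]
      have hne0 : ((splitRef ("\n---\n\n" : String).toList (List.drop (n + 6) text.toList)).map String.ofList).length ≠ 0 := by
        simp only [List.length_map, ne_eq, List.length_eq_zero_iff]
        exact splitRef_ne_nil _ _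
      rw [if_neg (by omega)]
    rw [hAs, hBs]
    by_cases hstrip : PySem.Str.strip (String.ofList (List.drop (n + 6) text.toList)) = ""
    · rw [if_pos hstrip]
      have hstripC : PySem.Chars.strip (List.drop (n + 6) text.toList) = [] := by
        have h1 := congrArg String.toList hstrip
        rw [PySem.Str.toList_strip] at h1
        simpa using h1
      have hone : splitRef ("\n---\n\n" : String).toList (List.drop (n + 6) text.toList) =
          [List.drop (n + 6) text.toList] :=
        splitRef_of_all_space _ _ (by decide) (strip_eq_nil_all_space _ hstripC)
      rw [hone]
      have hfilter : (([List.drop (n + 6) text.toList].map String.ofList).map PySem.Str.strip).filter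
          (fun p => !(p == "")) = [] := by
        simp [List.filter, hstrip]
      rw [hfilter, hheadereq]
    · rw [if_neg hstrip, hheadereq, filter_map_strip]
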